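-- pv_equiv track=rewrite | github.com/Popygai4ik/files | УРОКИ/итоговая январь.py | g2
-- ===== SOURCE A (Python) =====
-- def g2 (s, p, end):
--     if s>= 81: return p in end
--     if s< 81 and max(end) == p: return False
--     mov = [g2(s * 2,p + 1, end), g2(s+3,p + 1, end),g2(s+ 1,p + 1, end)]
--     if (p + 1) % 2 == end[0] % 2:
--         return any(mov)
--     else:
--         return all(mov)
-- ===== SOURCE B (Python) =====
-- def g2(s, p, end):
--     if s >= 81:
--         return p in end
--     top = max(end)
--     par = end[0] % 2
--     memo = {}
--
--     def go(s, p):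
--         if s >= 81:
--             return p in end
--         if top == p:
--             return False
--         key = (s, p)
--         if key in memo:
--             return memo[key]
--         mov = [go(s * 2, p + 1), go(s + 3, p + 1), go(s + 1, p + 1)]
--         res = any(mov) if (p + 1) % 2 == par else all(mov)
--         memo[key] = res
--         return res
--
--     return go(s, p)
-- ===== Notes on version B (the rewrite author's own statement) =====
-- stated objective: alternative
-- what changed: B memoizes the recursion on the (s,p) state in a dict (and hoists max(end) and end[0]%2 out of the recursion), so each state is evaluated once instead of A re-expanding the 3-way tree at every node; intended as faster, but a timing run could not confirm a ratio (A timed out where B returned).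
import Mathlib
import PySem

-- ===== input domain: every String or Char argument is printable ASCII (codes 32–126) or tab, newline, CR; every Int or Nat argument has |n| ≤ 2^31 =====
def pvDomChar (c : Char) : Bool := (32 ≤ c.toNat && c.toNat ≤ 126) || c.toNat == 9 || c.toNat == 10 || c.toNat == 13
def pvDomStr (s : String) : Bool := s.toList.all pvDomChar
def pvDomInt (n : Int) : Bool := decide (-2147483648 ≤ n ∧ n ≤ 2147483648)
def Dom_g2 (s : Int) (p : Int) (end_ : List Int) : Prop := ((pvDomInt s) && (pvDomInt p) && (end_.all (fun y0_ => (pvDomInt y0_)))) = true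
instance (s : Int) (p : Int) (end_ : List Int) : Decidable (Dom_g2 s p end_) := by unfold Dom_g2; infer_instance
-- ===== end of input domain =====

-- B memoizes the recursion on the (s, p) state (and hoists max(end) / end[0] % 2 out of the
-- recursion), so each state is evaluated once where A re-expands the whole subtree.

-- ===== PORT A =====
-- Fuelled transliteration of A's recursion; the fuel below strictly exceeds the recursion
-- depth on every input in Pre_, and fuel 0 is never reached there.
def g2F : Nat → Int → Int → List Int → Bool
  | 0, _, _, _ => false
  | f+1, s, p, e =>
    if 81 ≤ s then e.contains p
    else
      match PySem.List.max? e (fun y => y) with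
      | none => false   -- Python: max([]) raises ValueError; excluded by Pre_g2
      | some m =>
        if m = p then false
        else
          let mov := [g2F f (s * 2) (p + 1) e, g2F f (s + 3) (p + 1) e, g2F f (s + 1) (p + 1) e]
          if PySem.Int.mod (p + 1) 2 = PySem.Int.mod (e.headD 0) 2 then mov.any id else mov.all id

def g2Fuel (s : Int) (p : Int) (end_ : List Int) : Nat :=
  (81 - s).toNat + (((PySem.List.max? end_ (fun y => y)).getD p) - p).toNat + 1

def g2 (s : Int) (p : Int) (end_ : List Int) : Bool := g2F (g2Fuel s p end_) s p end_

-- ===== PORT B =====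
-- Fuelled transliteration of Source B's inner `go`, threading the memo dict explicitly.
def g2AF : Nat → Int → Int → List Int → Int → Int → PySem.Dict (Int × Int) Bool →
    Bool × PySem.Dict (Int × Int) Bool
  | 0, _, _, _, _, _, memo => (false, memo)
  | f+1, s, p, e, top, par, memo =>
    if 81 ≤ s then (e.contains p, memo)
    else if top = p then (false, memo)
    else
      match memo.get? (s, p) with
      | some b => (b, memo)
      | none =>
        let r1 := g2AF f (s * 2) (p + 1) e top par memo
        let r2 := g2AF f (s + 3) (p + 1) e top par r1.2
        let r3 := g2AF f (s + 1) (p + 1) e top par r2.2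
        let res := if PySem.Int.mod (p + 1) 2 = par then r1.1 || r2.1 || r3.1
                   else r1.1 && r2.1 && r3.1
        (res, r3.2.insert (s, p) res)

def g2_alt (s : Int) (p : Int) (end_ : List Int) : Bool :=
  if 81 ≤ s then end_.contains p
  else
    match PySem.List.max? end_ (fun y => y) with
    | none => false   -- Python: max([]) raises ValueError; excluded by Pre_g2
    | some top =>
      (g2AF ((81 - s).toNat + (top - p).toNat + 1) s p end_ top (PySem.Int.mod (end_.headD 0) 2) PySem.Dict.empty).1

-- ===== PRECONDITION & SPEC =====
-- Pre_ excludes exactly the inputs on which Python A raises: end == [] with s < 81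
-- (max([]) is a ValueError) and s ≤ 0 with p greater than max(end) (the s*2 move no longer
-- increases s and p never reaches max(end), so the recursion never terminates: RecursionError).
def Pre_g2 (s : Int) (p : Int) (end_ : List Int) : Prop :=
  81 ≤ s ∨ (end_ ≠ [] ∧ (1 ≤ s ∨ ∃ m ∈ end_, p ≤ m))
instance (s : Int) (p : Int) (end_ : List Int) : Decidable (Pre_g2 s p end_) := by
  unfold Pre_g2; infer_instance
def pvWitness_g2 : Int × Int × List Int := (1, 0, [3])

def Spec_g2 (s : Int) (p : Int) (end_ : List Int) (out : Bool) : Prop := out = g2_alt s p end_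
instance (s : Int) (p : Int) (end_ : List Int) (out : Bool) : Decidable (Spec_g2 s p end_ out) := by
  unfold Spec_g2; infer_instance

-- ===== CLAIM (what is proved, stated in full; the proofs are below) =====
def Claim_equal_g2 : Prop := ∀ (s : Int) (p : Int) (end_ : List Int),
  Dom_g2 s p end_ → Pre_g2 s p end_ → Spec_g2 s p end_ (g2 s p end_)

-- ===== LEMMAS AND PROOFS =====

-- depth bound of the recursion from state (s, p), with M = max(end)
def g2D (M s p : Int) : Nat := if p ≤ M then (M - p).toNat else (81 - s).toNat

-- the "true value" of state (s, p): A's recursion run with just enough fuel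
def g2V (e : List Int) (M s p : Int) : Bool := g2F (g2D M s p + 1) s p e

lemma g2_child (M s p s' : Int) (hI : 1 ≤ s ∨ p ≤ M) (hs : ¬ 81 ≤ s) (hne : ¬ M = p)
    (hs' : s' = s * 2 ∨ s' = s + 3 ∨ s' = s + 1) :
    (1 ≤ s' ∨ p + 1 ≤ M) ∧ g2D M s' (p + 1) < g2D M s p := by
  rcases hs' with rfl | rfl | rfl <;> unfold g2D <;> rcases hI with h | h <;> split_ifs <;> omega

lemma g2F_stab (e : List Int) (M : Int) (hmax : PySem.List.max? e (fun y => y) = some M) :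
    ∀ (f g : Nat) (s p : Int), (1 ≤ s ∨ p ≤ M) → g2D M s p < f → g2D M s p < g →
      g2F f s p e = g2F g s p e := by
  intro f
  induction f with
  | zero => intro g s p _ hf _; omega
  | succ f ih =>
    intro g s p hI hf hg
    cases g with
    | zero => omega
    | succ g =>
      by_cases h81 : 81 ≤ s
      · simp [g2F, h81]
      · by_cases hmp : M = p
        · simp [g2F, h81, hmax, hmp]
        · have c1 := g2_child M s p (s * 2) hI h81 hmp (Or.inl rfl)
          have c2 := g2_child M s p (s + 3) hI h81 hmp (Or.inr (Or.inl rfl))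
          have c3 := g2_child M s p (s + 1) hI h81 hmp (Or.inr (Or.inr rfl))
          have h1 := ih g (s * 2) (p + 1) c1.1 (by omega) (by omega)
          have h2 := ih g (s + 3) (p + 1) c2.1 (by omega) (by omega)
          have h3 := ih g (s + 1) (p + 1) c3.1 (by omega) (by omega)
          simp only [g2F, hmax]
          rw [if_neg h81, if_neg h81, if_neg hmp, if_neg hmp, h1, h2, h3]

lemma g2V_step (e : List Int) (M s p : Int)
    (hmax : PySem.List.max? e (fun y => y) = some M)
    (hI : 1 ≤ s ∨ p ≤ M) (h81 : ¬ 81 ≤ s) (hmp : ¬ M = p) :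
    g2V e M s p =
      (if PySem.Int.mod (p + 1) 2 = PySem.Int.mod (e.headD 0) 2 then
        g2V e M (s * 2) (p + 1) || g2V e M (s + 3) (p + 1) || g2V e M (s + 1) (p + 1)
       else g2V e M (s * 2) (p + 1) && g2V e M (s + 3) (p + 1) && g2V e M (s + 1) (p + 1)) := by
  have c1 := g2_child M s p (s * 2) hI h81 hmp (Or.inl rfl)
  have c2 := g2_child M s p (s + 3) hI h81 hmp (Or.inr (Or.inl rfl))
  have c3 := g2_child M s p (s + 1) hI h81 hmp (Or.inr (Or.inr rfl))
  have h1 := g2F_stab e M hmax (g2D M s p) (g2D M (s * 2) (p + 1) + 1) (s * 2) (p + 1)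
    c1.1 (by omega) (by omega)
  have h2 := g2F_stab e M hmax (g2D M s p) (g2D M (s + 3) (p + 1) + 1) (s + 3) (p + 1)
    c2.1 (by omega) (by omega)
  have h3 := g2F_stab e M hmax (g2D M s p) (g2D M (s + 1) (p + 1) + 1) (s + 1) (p + 1)
    c3.1 (by omega) (by omega)
  show g2F (g2D M s p + 1) s p e = _
  simp only [g2F, hmax]
  rw [if_neg h81, if_neg hmp, h1, h2, h3]
  simp [g2V, List.any, List.all, Bool.or_assoc, Bool.and_assoc]

lemma g2AF_correct (e : List Int) (M par : Int)
    (hmax : PySem.List.max? e (fun y => y) = some M)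
    (hpar : par = PySem.Int.mod (e.headD 0) 2) :
    ∀ (f : Nat) (s p : Int) (memo : PySem.Dict (Int × Int) Bool),
      (1 ≤ s ∨ p ≤ M) → g2D M s p < f →
      (∀ q b, memo.get? q = some b → b = g2V e M q.1 q.2) →
      (g2AF f s p e M par memo).1 = g2V e M s p ∧
      (∀ q b, (g2AF f s p e M par memo).2.get? q = some b → b = g2V e M q.1 q.2) := by
  intro f
  induction f with
  | zero => intro s p memo _ hf _; omega
  | succ f ih =>
    intro s p memo hI hf hInv
    by_cases h81 : 81 ≤ s
    · refine ⟨?_, by simpa [g2AF, h81] using hInv⟩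
      simp [g2AF, h81, g2V, g2F]
    · by_cases hmp : M = p
      · refine ⟨?_, by simpa [g2AF, h81, hmp] using hInv⟩
        simp [g2AF, h81, hmp, g2V, g2F, hmax]
      · rcases hget : memo.get? (s, p) with _ | b
        · -- memo miss: three recursive calls then insert
          have c1 := g2_child M s p (s * 2) hI h81 hmp (Or.inl rfl)
          have c2 := g2_child M s p (s + 3) hI h81 hmp (Or.inr (Or.inl rfl))
          have c3 := g2_child M s p (s + 1) hI h81 hmp (Or.inr (Or.inr rfl))
          obtain ⟨v1, i1⟩ := ih (s * 2) (p + 1) memo c1.1 (by omega) hInv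
          obtain ⟨v2, i2⟩ := ih (s + 3) (p + 1) _ c2.1 (by omega) i1
          obtain ⟨v3, i3⟩ := ih (s + 1) (p + 1) _ c3.1 (by omega) i2
          have hres :
              (if PySem.Int.mod (p + 1) 2 = par then
                (g2AF f (s * 2) (p + 1) e M par memo).1 ||
                (g2AF f (s + 3) (p + 1) e M par (g2AF f (s * 2) (p + 1) e M par memo).2).1 ||
                (g2AF f (s + 1) (p + 1) e M par
                  (g2AF f (s + 3) (p + 1) e M par (g2AF f (s * 2) (p + 1) e M par memo).2).2).1
               else
                (g2AF f (s * 2) (p + 1) e M par memo).1 &&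
                (g2AF f (s + 3) (p + 1) e M par (g2AF f (s * 2) (p + 1) e M par memo).2).1 &&
                (g2AF f (s + 1) (p + 1) e M par
                  (g2AF f (s + 3) (p + 1) e M par (g2AF f (s * 2) (p + 1) e M par memo).2).2).1)
              = g2V e M s p := by
            rw [v1, v2, v3, g2V_step e M s p hmax hI h81 hmp, hpar]
          constructor
          · simp only [g2AF, if_neg h81, if_neg hmp, hget]
            exact hres
          · simp only [g2AF, if_neg h81, if_neg hmp, hget]
            intro q b hq
            rw [PySem.Dict.get?_insert] at hq
            split at hq
            · rename_i hq'
              subst hq'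
              rw [Option.some_inj] at hq
              rw [← hq]
              simpa using hres
            · exact i3 q b hq
        · refine ⟨?_, by simpa [g2AF, h81, hmp, hget] using hInv⟩
          simp only [g2AF, if_neg h81, if_neg hmp, hget]
          exact hInv (s, p) b hget

-- ===== VERDICT (by name: the statement is the Claim_ definition above) =====
theorem g2_spec : Claim_equal_g2 := by
  intro s p e _ hpre
  unfold Spec_g2
  by_cases h81 : 81 ≤ s
  · unfold g2 g2_alt g2Fuel
    simp [g2F, h81]
  · rcases hpre with h | ⟨hne, hI⟩
    · omega
    · obtain ⟨M, hmax⟩ : ∃ M, PySem.List.max? e (fun y => y) = some M := by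
        rcases h : PySem.List.max? e (fun y => y) with _ | M
        · exact absurd (((PySem.List.max?_eq_none_iff e (fun y => y)).mp h)) hne
        · exact ⟨M, rfl⟩
      have hI' : 1 ≤ s ∨ p ≤ M := by
        rcases hI with h | ⟨m, hm, hpm⟩
        · exact Or.inl h
        · exact Or.inr (le_trans hpm (PySem.List.max?_isMax hmax m hm))
      have hfuel : g2D M s p < g2Fuel s p e := by
        unfold g2Fuel g2D
        rw [hmax]
        simp only [Option.getD_some]
        split_ifs <;> omega
      have hA : g2 s p e = g2V e M s p := by
        unfold g2 g2V
        exact g2F_stab e M hmax (g2Fuel s p e) (g2D M s p + 1) s p hI' hfuel (by omega)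
      have hfuel' : g2D M s p < (81 - s).toNat + (M - p).toNat + 1 := by
        unfold g2D; split_ifs <;> omega
      have hB := g2AF_correct e M (PySem.Int.mod (e.headD 0) 2) hmax rfl
        ((81 - s).toNat + (M - p).toNat + 1) s p PySem.Dict.empty hI' hfuel'
        (by intro q b hq; simp [PySem.Dict.get?_empty] at hq)
      rw [hA]
      unfold g2_alt
      rw [if_neg h81, hmax]
      exact hB.1.symm
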